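-- pv_equiv track=rewrite | github.com/ahol77/Computational-Physics-Final | agents.py | wolf_eat_sheep
-- ===== SOURCE A (Python) =====
-- energy_from_eating_sheep = 40
--
-- def wolf_eat_sheep(wolf, sheep):
--     for i in range(len(wolf)):
--         for j in range(len(sheep)):
--             if wolf[i][0] == sheep[j][0] and sheep[j][1] != 0:
--                 wolf[i][1] += energy_from_eating_sheep
--                 sheep[j][1] = 0
--                 break
--     return wolf, sheep
-- ===== SOURCE B (Python) =====
-- energy_from_eating_sheep = 40
--
-- def wolf_eat_sheep(wolf, sheep):
--     # counting approach: per-position tallies instead of per-wolf rescans of the sheep list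
--     avail = {}
--     for s in sheep:
--         if s[1] != 0:
--             avail[s[0]] = avail.get(s[0], 0) + 1
--     eaten = {}
--     for w in wolf:
--         p = w[0]
--         k = eaten.get(p, 0)
--         if k < avail.get(p, 0):
--             w[1] += energy_from_eating_sheep
--             eaten[p] = k + 1
--     seen = {}
--     for s in sheep:
--         if s[1] != 0:
--             p = s[0]
--             r = seen.get(p, 0)
--             if r < eaten.get(p, 0):
--                 s[1] = 0
--             seen[p] = r + 1
--     return wolf, sheep
-- ===== Notes on version B (the rewrite author's own statement) =====
-- stated objective: alternative
-- what changed: Replaces the per-wolf rescan of the sheep list by three linear passes with per-position dict tallies (available/eaten/seen counts), so no wolf ever scans the sheep list; worst-case O(W+S) vs A's O(W*S), not confirmed faster on the random timing inputs.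
-- outside the precondition, e.g. on wolf_eat_sheep([], [[]]): A returns ([], [[]]), B raises IndexError; on wolf_eat_sheep([[5]], []): A returns ([[5]], []), B returns ([[5]], [])
import Mathlib
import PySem

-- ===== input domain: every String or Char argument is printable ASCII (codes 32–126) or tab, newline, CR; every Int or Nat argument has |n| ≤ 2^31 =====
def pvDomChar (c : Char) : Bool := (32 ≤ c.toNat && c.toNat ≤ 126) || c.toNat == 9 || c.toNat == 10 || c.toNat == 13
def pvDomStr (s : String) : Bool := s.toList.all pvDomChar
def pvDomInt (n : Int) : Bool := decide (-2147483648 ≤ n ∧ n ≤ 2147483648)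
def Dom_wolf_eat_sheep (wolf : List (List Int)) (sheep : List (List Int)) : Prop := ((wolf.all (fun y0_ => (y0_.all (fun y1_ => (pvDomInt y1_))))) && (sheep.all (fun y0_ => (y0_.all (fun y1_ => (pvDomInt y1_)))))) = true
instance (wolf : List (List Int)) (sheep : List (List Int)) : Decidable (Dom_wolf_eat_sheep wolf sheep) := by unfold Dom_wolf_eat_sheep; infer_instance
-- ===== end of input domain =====

-- B replaces A's per-wolf rescan of the sheep list by three linear passes with per-position
-- dict tallies (a different algorithm; worst-case O(W+S) vs A's O(W*S), not measured faster on
-- a timing run's random inputs). Both Pythons mutate their arguments in place the same way;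
-- the equivalence proved here is about the returned pair.

-- ===== PORT A =====
-- inner 'for j in range(len(sheep))' loop of A: returns (ate?, updated sheep)
def aInner (p : Int) : List (List Int) → Bool × List (List Int)
  | [] => (false, [])
  | s :: rest =>
    if PySem.List.pyGetD s 0 0 = p ∧ PySem.List.pyGetD s 1 0 ≠ 0 then
      (true, PySem.List.pySetD s 1 0 :: rest)
    else
      let r := aInner p rest
      (r.1, s :: r.2)

-- outer 'for i in range(len(wolf))' loop of A
def aOuter : List (List Int) → List (List Int) → List (List Int) × List (List Int)
  | [], sh => ([], sh)
  | w :: ws, sh =>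
    let r := aInner (PySem.List.pyGetD w 0 0) sh
    let w' := if r.1 then PySem.List.pySetD w 1 (PySem.List.pyGetD w 1 0 + 40) else w
    let rest := aOuter ws r.2
    (w' :: rest.1, rest.2)

def wolf_eat_sheep (wolf : List (List Int)) (sheep : List (List Int)) : List (List Int) × List (List Int) :=
  aOuter wolf sheep

-- ===== PORT B =====
-- first pass of Source B: avail[pos] = number of sheep there with nonzero energy
def bAvail : List (List Int) → PySem.Dict Int Int → PySem.Dict Int Int
  | [], d => d
  | s :: rest, d =>
    bAvail rest
      (if PySem.List.pyGetD s 1 0 ≠ 0 then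
        d.insert (PySem.List.pyGetD s 0 0) (d.getD (PySem.List.pyGetD s 0 0) 0 + 1)
      else d)

-- second pass of Source B: a wolf eats iff fewer wolves before it at its position than available sheep
def bWolves : List (List Int) → PySem.Dict Int Int → PySem.Dict Int Int → List (List Int) × PySem.Dict Int Int
  | [], _, eaten => ([], eaten)
  | w :: ws, avail, eaten =>
    let p := PySem.List.pyGetD w 0 0
    let k := eaten.getD p 0
    if k < avail.getD p 0 then
      let rest := bWolves ws avail (eaten.insert p (k + 1))
      (PySem.List.pySetD w 1 (PySem.List.pyGetD w 1 0 + 40) :: rest.1, rest.2)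
    else
      let rest := bWolves ws avail eaten
      (w :: rest.1, rest.2)

-- third pass of Source B: zero the first eaten[pos] available sheep at each position
def bZero : List (List Int) → PySem.Dict Int Int → PySem.Dict Int Int → List (List Int)
  | [], _, _ => []
  | s :: rest, eaten, seen =>
    if PySem.List.pyGetD s 1 0 ≠ 0 then
      let p := PySem.List.pyGetD s 0 0
      let r := seen.getD p 0
      (if r < eaten.getD p 0 then PySem.List.pySetD s 1 0 else s) :: bZero rest eaten (seen.insert p (r + 1))
    else
      s :: bZero rest eaten seen

def wolf_eat_sheep_alt (wolf : List (List Int)) (sheep : List (List Int)) : List (List Int) × List (List Int) :=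
  let avail := bAvail sheep PySem.Dict.empty
  let r := bWolves wolf avail PySem.Dict.empty
  (r.1, bZero sheep r.2 PySem.Dict.empty)

-- ===== PRECONDITION & SPEC =====
-- Pre_ excludes rows with fewer than 2 entries: A (and B) raise IndexError whenever such a row
-- is accessed; rows that happen never to be accessed (e.g. a 1-entry wolf with no matching sheep,
-- on which A still returns) are excluded with them for a closed-form condition.
def Pre_wolf_eat_sheep (wolf : List (List Int)) (sheep : List (List Int)) : Prop :=
  (∀ w ∈ wolf, 2 ≤ w.length) ∧ (∀ s ∈ sheep, 2 ≤ s.length)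
instance (wolf : List (List Int)) (sheep : List (List Int)) : Decidable (Pre_wolf_eat_sheep wolf sheep) := by unfold Pre_wolf_eat_sheep; infer_instance
def pvWitness_wolf_eat_sheep : List (List Int) × List (List Int) := ([[0, 5], [1, 5]], [[0, 1], [0, 2]])

def Spec_wolf_eat_sheep (wolf : List (List Int)) (sheep : List (List Int)) (out : List (List Int) × List (List Int)) : Prop := out = wolf_eat_sheep_alt wolf sheep
instance (wolf : List (List Int)) (sheep : List (List Int)) (out : List (List Int) × List (List Int)) : Decidable (Spec_wolf_eat_sheep wolf sheep out) := by unfold Spec_wolf_eat_sheep; infer_instance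

-- ===== CLAIM (what is proved, stated in full; the proofs are below) =====
def Claim_equal_wolf_eat_sheep : Prop := ∀ (wolf : List (List Int)) (sheep : List (List Int)), Dom_wolf_eat_sheep wolf sheep → Pre_wolf_eat_sheep wolf sheep → Spec_wolf_eat_sheep wolf sheep (wolf_eat_sheep wolf sheep)

-- ===== LEMMAS AND PROOFS =====

-- number of available (nonzero-energy) sheep at position p
def availCnt : List (List Int) → Int → Int
  | [], _ => 0
  | s :: rest, p =>
    (if PySem.List.pyGetD s 0 0 = p ∧ PySem.List.pyGetD s 1 0 ≠ 0 then 1 else 0) + availCnt rest p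

-- pointwise function update
def upd (e : Int → Int) (p : Int) (v : Int) : Int → Int := fun q => if q = p then v else e q

-- zero the first (e pos) available sheep at each position
def applyE (e : Int → Int) : List (List Int) → List (List Int)
  | [] => []
  | s :: rest =>
    if PySem.List.pyGetD s 1 0 ≠ 0 ∧ 0 < e (PySem.List.pyGetD s 0 0) then
      PySem.List.pySetD s 1 0 ::
        applyE (upd e (PySem.List.pyGetD s 0 0) (e (PySem.List.pyGetD s 0 0) - 1)) rest
    else s :: applyE e rest

-- bWolves with the dicts abstracted to their lookup functions
def gWolves : List (List Int) → (Int → Int) → (Int → Int) → List (List Int) × (Int → Int)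
  | [], _, e => ([], e)
  | w :: ws, a, e =>
    let p := PySem.List.pyGetD w 0 0
    if e p < a p then
      let rest := gWolves ws a (upd e p (e p + 1))
      (PySem.List.pySetD w 1 (PySem.List.pyGetD w 1 0 + 40) :: rest.1, rest.2)
    else
      let rest := gWolves ws a e
      (w :: rest.1, rest.2)

-- bZero with the dicts abstracted to their lookup functions
def gZero : List (List Int) → (Int → Int) → (Int → Int) → List (List Int)
  | [], _, _ => []
  | s :: rest, e, seen =>
    if PySem.List.pyGetD s 1 0 ≠ 0 then
      let p := PySem.List.pyGetD s 0 0
      (if seen p < e p then PySem.List.pySetD s 1 0 else s) :: gZero rest e (upd seen p (seen p + 1))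
    else s :: gZero rest e seen

theorem availCnt_nonneg (s : List (List Int)) (p : Int) : 0 ≤ availCnt s p := by
  induction s with
  | nil => simp [availCnt]
  | cons x rest ih => simp only [availCnt]; split <;> omega

theorem bAvail_getD (s : List (List Int)) (d : PySem.Dict Int Int) (q : Int) :
    (bAvail s d).getD q 0 = d.getD q 0 + availCnt s q := by
  induction s generalizing d with
  | nil => simp [bAvail, availCnt]
  | cons x rest ih =>
    simp only [bAvail, availCnt]
    rw [ih]
    by_cases h1 : PySem.List.pyGetD x 1 0 ≠ 0
    · rw [if_pos h1, PySem.Dict.getD_insert]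
      by_cases hq : q = PySem.List.pyGetD x 0 0
      · rw [if_pos hq, if_pos ⟨hq.symm, h1⟩, hq]; omega
      · rw [if_neg hq, if_neg (fun hc => hq hc.1.symm)]; omega
    · rw [if_neg h1, if_neg (fun hc => h1 hc.2)]; omega

theorem bWolves_eq (ws : List (List Int)) (av ea : PySem.Dict Int Int) :
    (bWolves ws av ea).1 = (gWolves ws (fun q => av.getD q 0) (fun q => ea.getD q 0)).1 ∧
    ∀ q, (bWolves ws av ea).2.getD q 0 = (gWolves ws (fun q => av.getD q 0) (fun q => ea.getD q 0)).2 q := by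
  induction ws generalizing ea with
  | nil => simp [bWolves, gWolves]
  | cons w ws ih =>
    simp only [bWolves, gWolves]
    split_ifs with h
    · have hf : (fun q => (ea.insert (PySem.List.pyGetD w 0 0) (ea.getD (PySem.List.pyGetD w 0 0) 0 + 1)).getD q 0)
          = upd (fun q => ea.getD q 0) (PySem.List.pyGetD w 0 0) (ea.getD (PySem.List.pyGetD w 0 0) 0 + 1) := by
        funext q; rw [PySem.Dict.getD_insert]; simp [upd]
      refine ⟨?_, fun q => ?_⟩
      · simp only [← hf, (ih _).1]
      · simp only [← hf, (ih _).2]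
    · exact ⟨by simp only [(ih _).1], fun q => by simp only [(ih _).2]⟩

theorem bZero_eq (s : List (List Int)) (ea se : PySem.Dict Int Int) :
    bZero s ea se = gZero s (fun q => ea.getD q 0) (fun q => se.getD q 0) := by
  induction s generalizing se with
  | nil => simp [bZero, gZero]
  | cons x rest ih =>
    simp only [bZero, gZero]
    by_cases h1 : PySem.List.pyGetD x 1 0 ≠ 0
    · rw [if_pos h1, if_pos h1]
      have hf : (fun q => (se.insert (PySem.List.pyGetD x 0 0) (se.getD (PySem.List.pyGetD x 0 0) 0 + 1)).getD q 0)
          = upd (fun q => se.getD q 0) (PySem.List.pyGetD x 0 0) (se.getD (PySem.List.pyGetD x 0 0) 0 + 1) := by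
        funext q; rw [PySem.Dict.getD_insert]; simp [upd]
      rw [ih, hf]
    · rw [if_neg h1, if_neg h1, ih]

theorem applyE_congr (s : List (List Int)) (e1 e2 : Int → Int)
    (h : ∀ p, max (e1 p) 0 = max (e2 p) 0) : applyE e1 s = applyE e2 s := by
  induction s generalizing e1 e2 with
  | nil => rfl
  | cons x rest ih =>
    have hp := h (PySem.List.pyGetD x 0 0)
    simp only [applyE]
    by_cases h1 : PySem.List.pyGetD x 1 0 ≠ 0 ∧ 0 < e1 (PySem.List.pyGetD x 0 0)
    · have h2 : PySem.List.pyGetD x 1 0 ≠ 0 ∧ 0 < e2 (PySem.List.pyGetD x 0 0) := ⟨h1.1, by omega⟩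
      rw [if_pos h1, if_pos h2]
      congr 1
      apply ih
      intro q
      simp only [upd]
      split_ifs with hq
      · omega
      · exact h q
    · have h2 : ¬ (PySem.List.pyGetD x 1 0 ≠ 0 ∧ 0 < e2 (PySem.List.pyGetD x 0 0)) :=
        fun hc => h1 ⟨hc.1, by omega⟩
      rw [if_neg h1, if_neg h2, ih e1 e2 h]

theorem gZero_eq_applyE (s : List (List Int)) (e seen : Int → Int) :
    gZero s e seen = applyE (fun p => e p - seen p) s := by
  induction s generalizing seen with
  | nil => rfl
  | cons x rest ih =>
    simp only [gZero, applyE]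
    by_cases h1 : PySem.List.pyGetD x 1 0 ≠ 0
    · rw [if_pos h1]
      by_cases h2 : seen (PySem.List.pyGetD x 0 0) < e (PySem.List.pyGetD x 0 0)
      · rw [if_pos h2, if_pos ⟨h1, by omega⟩, ih]
        congr 1
        apply applyE_congr
        intro q
        simp only [upd]
        split_ifs with hq
        · subst hq; omega
        · omega
      · rw [if_neg h2, if_neg (fun hc => h2 (by omega)), ih]
        congr 1
        apply applyE_congr
        intro q
        simp only [upd]
        split_ifs with hq
        · subst hq; omega
        · omega
    · rw [if_neg h1, if_neg (fun hc => h1 hc.1), ih]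

theorem len2_of_energy_ne (s : List Int) (h : PySem.List.pyGetD s 1 0 ≠ 0) : 2 ≤ s.length := by
  match s with
  | [] => exact absurd rfl h
  | [x] => exact absurd rfl h
  | a :: b :: rest => simp

theorem pyGetD_pySetD_energy (s : List Int) (h : 2 ≤ s.length) (v : Int) :
    PySem.List.pyGetD (PySem.List.pySetD s 1 v) 1 0 = v := by
  match s with
  | a :: b :: rest =>
    simp [PySem.List.pySetD, PySem.List.pySet?, PySem.List.pyGetD, PySem.List.pyGet?, PySem.List.pyIdx?]

theorem aInner_applyE (s0 : List (List Int)) (e : Int → Int) (p : Int)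
    (hb : ∀ q, 0 ≤ e q ∧ e q ≤ availCnt s0 q) :
    aInner p (applyE e s0) =
      if e p < availCnt s0 p then (true, applyE (upd e p (e p + 1)) s0)
      else (false, applyE e s0) := by
  induction s0 generalizing e with
  | nil =>
    have := (hb p).1
    rw [if_neg (by simp only [availCnt]; omega)]
    rfl
  | cons s rest ih =>
    have hnnp := availCnt_nonneg rest p
    by_cases hA : PySem.List.pyGetD s 1 0 ≠ 0 ∧ 0 < e (PySem.List.pyGetD s 0 0)
    · -- the head is an available sheep that applyE e zeroes
      have hlen : 2 ≤ s.length := len2_of_energy_ne s hA.1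
      have hz : applyE e (s :: rest) = PySem.List.pySetD s 1 0 ::
          applyE (upd e (PySem.List.pyGetD s 0 0) (e (PySem.List.pyGetD s 0 0) - 1)) rest := by
        simp only [applyE, if_pos hA]
      rw [hz]
      have hb' : ∀ q, 0 ≤ upd e (PySem.List.pyGetD s 0 0) (e (PySem.List.pyGetD s 0 0) - 1) q ∧
          upd e (PySem.List.pyGetD s 0 0) (e (PySem.List.pyGetD s 0 0) - 1) q ≤ availCnt rest q := by
        intro q
        have h1 := hb q
        simp only [availCnt] at h1
        simp only [upd]
        split_ifs with hq
        · subst hq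
          rw [if_pos ⟨rfl, hA.1⟩] at h1
          omega
        · rw [if_neg (fun hc => hq hc.1.symm)] at h1
          omega
      rw [show aInner p (PySem.List.pySetD s 1 0 ::
            applyE (upd e (PySem.List.pyGetD s 0 0) (e (PySem.List.pyGetD s 0 0) - 1)) rest)
          = ((aInner p (applyE (upd e (PySem.List.pyGetD s 0 0) (e (PySem.List.pyGetD s 0 0) - 1)) rest)).1,
             PySem.List.pySetD s 1 0 ::
               (aInner p (applyE (upd e (PySem.List.pyGetD s 0 0) (e (PySem.List.pyGetD s 0 0) - 1)) rest)).2)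
          from by
            simp only [aInner, pyGetD_pySetD_energy s hlen 0]
            rw [if_neg (by intro hc; exact hc.2 rfl)]]
      rw [ih _ hb']
      have hcnt : availCnt (s :: rest) p =
          (if PySem.List.pyGetD s 0 0 = p ∧ PySem.List.pyGetD s 1 0 ≠ 0 then 1 else 0) + availCnt rest p := rfl
      by_cases hc : e p < availCnt (s :: rest) p
      · have hc' : upd e (PySem.List.pyGetD s 0 0) (e (PySem.List.pyGetD s 0 0) - 1) p < availCnt rest p := by
          rw [hcnt] at hc
          simp only [upd]
          split_ifs with hq
          · subst hq; rw [if_pos ⟨rfl, hA.1⟩] at hc; omega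
          · rw [if_neg (fun hcc => hq hcc.1.symm)] at hc; omega
        rw [if_pos hc', if_pos hc]
        have hhead : applyE (upd e p (e p + 1)) (s :: rest) = PySem.List.pySetD s 1 0 ::
            applyE (upd (upd e p (e p + 1)) (PySem.List.pyGetD s 0 0)
              (upd e p (e p + 1) (PySem.List.pyGetD s 0 0) - 1)) rest := by
          simp only [applyE]
          rw [if_pos]
          refine ⟨hA.1, ?_⟩
          have := (hb p).1
          simp only [upd]
          split_ifs with hq
          · omega
          · exact hA.2
        rw [hhead]
        simp only [Prod.mk.injEq, true_and]
        congr 1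
        congr 1
        funext q
        simp only [upd]
        split_ifs <;> subst_vars <;> omega
      · have hc' : ¬ upd e (PySem.List.pyGetD s 0 0) (e (PySem.List.pyGetD s 0 0) - 1) p < availCnt rest p := by
          rw [hcnt] at hc
          simp only [upd]
          split_ifs with hq
          · subst hq; rw [if_pos ⟨rfl, hA.1⟩] at hc; omega
          · rw [if_neg (fun hcc => hq hcc.1.symm)] at hc; omega
        rw [if_neg hc', if_neg hc]
    · -- the head is not zeroed by applyE e
      have hz : applyE e (s :: rest) = s :: applyE e rest := by
        simp only [applyE]
        rw [if_neg hA]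
      rw [hz]
      by_cases hB : PySem.List.pyGetD s 0 0 = p ∧ PySem.List.pyGetD s 1 0 ≠ 0
      · -- the head itself is the first match for this wolf
        have hep : e p = 0 := by
          have h1 := (hb p).1
          have h2 : ¬ 0 < e (PySem.List.pyGetD s 0 0) := fun hc => hA ⟨hB.2, hc⟩
          rw [hB.1] at h2
          omega
        have hlen : 2 ≤ s.length := len2_of_energy_ne s hB.2
        simp only [aInner, if_pos hB]
        rw [if_pos (by
          simp only [availCnt]
          rw [if_pos hB]
          omega)]
        have hhead : applyE (upd e p (e p + 1)) (s :: rest) = PySem.List.pySetD s 1 0 ::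
            applyE (upd (upd e p (e p + 1)) (PySem.List.pyGetD s 0 0)
              (upd e p (e p + 1) (PySem.List.pyGetD s 0 0) - 1)) rest := by
          simp only [applyE]
          rw [if_pos ⟨hB.2, by rw [hB.1]; have := (hb p).1; simp [upd]; omega⟩]
        rw [hhead]
        simp only [Prod.mk.injEq, true_and]
        congr 1
        congr 1
        funext q
        simp only [upd, hB.1]
        split_ifs <;> subst_vars <;> omega
      · -- the head does not match this wolf: both sides skip it
        have hb' : ∀ q, 0 ≤ e q ∧ e q ≤ availCnt rest q := by
          intro q
          have h1 := hb q
          simp only [availCnt] at h1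
          split_ifs at h1 with hcc
          · have h2 : ¬ 0 < e (PySem.List.pyGetD s 0 0) := fun hc => hA ⟨hcc.2, hc⟩
            rw [hcc.1] at h2
            have := availCnt_nonneg rest q
            omega
          · omega
        rw [show aInner p (s :: applyE e rest)
            = ((aInner p (applyE e rest)).1, s :: (aInner p (applyE e rest)).2) from by
          simp only [aInner]
          rw [if_neg hB]]
        rw [ih _ hb']
        have hcnt : availCnt (s :: rest) p = availCnt rest p := by
          simp only [availCnt]
          rw [if_neg hB]
          omega
        rw [hcnt]
        by_cases hc : e p < availCnt rest p
        · rw [if_pos hc, if_pos hc]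
          have hhead : applyE (upd e p (e p + 1)) (s :: rest) = s ::
              applyE (upd e p (e p + 1)) rest := by
            simp only [applyE]
            rw [if_neg]
            intro hcc
            have hne : ¬ PySem.List.pyGetD s 0 0 = p := fun h => hB ⟨h, hcc.1⟩
            simp only [upd, if_neg hne] at hcc
            exact hA ⟨hcc.1, hcc.2⟩
          rw [hhead]
        · rw [if_neg hc, if_neg hc]

theorem aOuter_eq (ws : List (List Int)) (s0 : List (List Int)) (e : Int → Int)
    (hb : ∀ q, 0 ≤ e q ∧ e q ≤ availCnt s0 q) :
    aOuter ws (applyE e s0) =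
      ((gWolves ws (availCnt s0) e).1, applyE (gWolves ws (availCnt s0) e).2 s0) := by
  induction ws generalizing e with
  | nil => simp [aOuter, gWolves]
  | cons w ws ih =>
    simp only [aOuter, gWolves, aInner_applyE s0 e (PySem.List.pyGetD w 0 0) hb]
    by_cases hc : e (PySem.List.pyGetD w 0 0) < availCnt s0 (PySem.List.pyGetD w 0 0)
    · rw [if_pos hc, if_pos hc]
      have hb' : ∀ q, 0 ≤ upd e (PySem.List.pyGetD w 0 0) (e (PySem.List.pyGetD w 0 0) + 1) q ∧
          upd e (PySem.List.pyGetD w 0 0) (e (PySem.List.pyGetD w 0 0) + 1) q ≤ availCnt s0 q := by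
        intro q
        have h1 := hb q
        have h2 := hb (PySem.List.pyGetD w 0 0)
        simp only [upd]
        split_ifs with hq
        · subst hq; omega
        · omega
      simp only [ih _ hb']
      simp
    · rw [if_neg hc, if_neg hc]
      simp only [ih _ hb]
      simp

theorem applyE_zero (s : List (List Int)) : applyE (fun _ => 0) s = s := by
  induction s with
  | nil => rfl
  | cons x rest ih => simp only [applyE]; rw [if_neg (by simp), ih]

-- ===== VERDICT (by name: the statement is the Claim_ definition above) =====
theorem wolf_eat_sheep_spec : Claim_equal_wolf_eat_sheep := by
  intro wolf sheep _ _
  unfold Spec_wolf_eat_sheep wolf_eat_sheep wolf_eat_sheep_alt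
  have hz : ∀ q, (0:Int) ≤ (fun _ => (0:Int)) q ∧ (fun _ => (0:Int)) q ≤ availCnt sheep q :=
    fun q => ⟨le_refl 0, availCnt_nonneg sheep q⟩
  have hmain := aOuter_eq wolf sheep (fun _ => 0) hz
  rw [applyE_zero] at hmain
  rw [hmain]
  have havail : (fun q => (bAvail sheep PySem.Dict.empty).getD q 0) = availCnt sheep := by
    funext q
    rw [bAvail_getD]
    simp [PySem.Dict.getD_empty]
  have hempty : (fun q => (PySem.Dict.empty : PySem.Dict Int Int).getD q 0) = (fun _ => (0:Int)) := by
    funext q; simp [PySem.Dict.getD_empty]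
  have hw := bWolves_eq wolf (bAvail sheep PySem.Dict.empty) PySem.Dict.empty
  rw [havail, hempty] at hw
  have h2 : (fun q => (bWolves wolf (bAvail sheep PySem.Dict.empty) PySem.Dict.empty).2.getD q 0)
      = (gWolves wolf (availCnt sheep) (fun _ => 0)).2 := by
    funext q; exact hw.2 q
  rw [Prod.ext_iff]
  refine ⟨hw.1.symm, ?_⟩
  show applyE (gWolves wolf (availCnt sheep) fun _ => 0).2 sheep
      = bZero sheep (bWolves wolf (bAvail sheep PySem.Dict.empty) PySem.Dict.empty).2 PySem.Dict.empty
  rw [bZero_eq, hempty, h2, gZero_eq_applyE]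
  apply applyE_congr
  intro q
  omega
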